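-- pv_equiv track=rewrite | github.com/Karan124/regulatory-scrapers | Scripts/scraper_orchestrator.py | filter_regulators_by_name
-- ===== SOURCE A (Python) =====
-- from typing import List, Dict, Optional, Tuple
--
-- def filter_regulators_by_name(regulators: List[Tuple], include: List[str] = None,
--                              exclude: List[str] = None) -> List[Tuple]:
--     """Filter regulators by name patterns"""
--     if include:
--         # Only include regulators matching any of the include patterns
--         filtered = []
--         for regulator in regulators:
--             regulator_name = regulator[0].lower()
--             if any(pattern.lower() in regulator_name for pattern in include):
--                 filtered.append(regulator)
--         regulators = filtered
--
--     if exclude: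
--         # Exclude regulators matching any of the exclude patterns
--         filtered = []
--         for regulator in regulators:
--             regulator_name = regulator[0].lower()
--             if not any(pattern.lower() in regulator_name for pattern in exclude):
--                 filtered.append(regulator)
--         regulators = filtered
--
--     return regulators
-- ===== SOURCE B (Python) =====
-- def filter_regulators_by_name(regulators, include=None, exclude=None):
--     """Filter regulators by name patterns (single pass, patterns lowered once)."""
--     inc = [p.lower() for p in include] if include else None
--     exc = [p.lower() for p in exclude] if exclude else None
--     return [r for r in regulators
--             for name in [r[0].lower()]
--             if (inc is None or any(p in name for p in inc))
--             and (exc is None or not any(p in name for p in exc))]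
-- ===== Notes on version B (the rewrite author's own statement) =====
-- stated objective: simpler
-- what changed: Replaces A's two sequential filtering loops (each rebuilding an intermediate list) with one list comprehension over the original list whose predicate fuses the include and exclude tests, with the pattern lists lowercased once up front; None/empty guards disable each side exactly as A's truthiness checks do.
import Mathlib
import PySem

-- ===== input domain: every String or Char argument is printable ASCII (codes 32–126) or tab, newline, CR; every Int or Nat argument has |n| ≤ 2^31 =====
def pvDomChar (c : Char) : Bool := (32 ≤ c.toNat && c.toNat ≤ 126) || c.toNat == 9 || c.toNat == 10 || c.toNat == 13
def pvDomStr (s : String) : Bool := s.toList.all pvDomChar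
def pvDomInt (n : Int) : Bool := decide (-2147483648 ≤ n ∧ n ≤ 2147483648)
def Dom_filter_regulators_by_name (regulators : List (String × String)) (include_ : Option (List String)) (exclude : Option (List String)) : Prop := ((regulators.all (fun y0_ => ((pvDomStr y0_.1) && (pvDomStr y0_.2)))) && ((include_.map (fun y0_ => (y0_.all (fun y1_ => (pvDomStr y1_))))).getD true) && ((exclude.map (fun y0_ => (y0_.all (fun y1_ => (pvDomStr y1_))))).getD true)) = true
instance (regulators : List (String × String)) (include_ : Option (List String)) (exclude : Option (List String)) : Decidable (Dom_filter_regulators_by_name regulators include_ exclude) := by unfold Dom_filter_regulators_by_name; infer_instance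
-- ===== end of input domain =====

-- B replaces A's two sequential filtering loops with one fused single-pass filter; objective: simpler.


-- ===== PORT A =====
-- Python truthiness of an optional list: None and [] are falsy
def pvTruthy (o : Option (List String)) : Bool :=
  match o with
  | none => false
  | some l => !l.isEmpty

def filter_regulators_by_name (regulators : List (String × String)) (include_ : Option (List String)) (exclude : Option (List String)) : List (String × String) :=
  -- first loop: keep regulators matching any include pattern
  let regulators1 :=
    if pvTruthy include_ then
      regulators.foldl (fun filtered regulator =>
        if (include_.getD []).any (fun pattern => PySem.Str.isIn (PySem.Str.lower pattern) (PySem.Str.lower regulator.1)) then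
          filtered ++ [regulator]
        else filtered) []
    else regulators
  -- second loop: drop regulators matching any exclude pattern
  let regulators2 :=
    if pvTruthy exclude then
      regulators1.foldl (fun filtered regulator =>
        if !((exclude.getD []).any (fun pattern => PySem.Str.isIn (PySem.Str.lower pattern) (PySem.Str.lower regulator.1))) then
          filtered ++ [regulator]
        else filtered) []
    else regulators1
  regulators2

-- ===== PORT B =====
def filter_regulators_by_name_alt (regulators : List (String × String)) (include_ : Option (List String)) (exclude : Option (List String)) : List (String × String) :=
  -- lower each pattern list once; none = that filter disabled
  let inc : Option (List String) := if pvTruthy include_ then some ((include_.getD []).map PySem.Str.lower) else none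
  let exc : Option (List String) := if pvTruthy exclude then some ((exclude.getD []).map PySem.Str.lower) else none
  regulators.filter (fun r =>
    let name := PySem.Str.lower r.1
    (match inc with | none => true | some ps => ps.any (fun p => PySem.Str.isIn p name))
    && (match exc with | none => true | some ps => !ps.any (fun p => PySem.Str.isIn p name)))

-- ===== PRECONDITION & SPEC =====
def Spec_filter_regulators_by_name (regulators : List (String × String)) (include_ : Option (List String)) (exclude : Option (List String)) (out : List (String × String)) : Prop := out = filter_regulators_by_name_alt regulators include_ exclude
instance (regulators : List (String × String)) (include_ : Option (List String)) (exclude : Option (List String)) (out : List (String × String)) : Decidable (Spec_filter_regulators_by_name regulators include_ exclude out) := by unfold Spec_filter_regulators_by_name; infer_instance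

-- ===== CLAIM (what is proved, stated in full; the proofs are below) =====
def Claim_equal_filter_regulators_by_name : Prop := ∀ (regulators : List (String × String)) (include_ : Option (List String)) (exclude : Option (List String)), Dom_filter_regulators_by_name regulators include_ exclude → Spec_filter_regulators_by_name regulators include_ exclude (filter_regulators_by_name regulators include_ exclude)

-- ===== LEMMAS AND PROOFS =====
theorem filter_regulators_main (regulators : List (String × String)) (include_ : Option (List String)) (exclude : Option (List String)) :
    filter_regulators_by_name regulators include_ exclude = filter_regulators_by_name_alt regulators include_ exclude := by
  unfold filter_regulators_by_name filter_regulators_by_name_alt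
  by_cases hi : pvTruthy include_ <;> by_cases he : pvTruthy exclude <;>
    simp [hi, he, PySem.List.foldl_append_ite_eq_filter, List.filter_filter] <;>
    refine List.filter_congr fun a _ => by
      rw [Bool.eq_iff_iff]
      simp [List.any_eq_true, Bool.and_comm, Function.comp]

-- ===== VERDICT (by name: the statement is the Claim_ definition above) =====
theorem filter_regulators_by_name_spec : Claim_equal_filter_regulators_by_name := by
  intro regs inc exc _
  unfold Spec_filter_regulators_by_name
  exact filter_regulators_main regs inc exc
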